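-- pv_equiv track=rewrite | github.com/VigneshwarRavichandran/Resume_Valuation | redis_store/redis_process.py | generate_language_score
-- ===== SOURCE A (Python) =====
-- def generate_language_score(repository):
-- 	programming_languages = {}
-- 	for repo in repository:
-- 		programming_language = repo['repo_language'].lower()
-- 		try:
-- 			if programming_languages[programming_language] < 100:
-- 				programming_languages[programming_language] += 10
-- 		except:
-- 			programming_languages[programming_language] = 10
-- 	return programming_languages
-- ===== SOURCE B (Python) =====
-- def generate_language_score(repository):
--     langs = [repo['repo_language'].lower() for repo in repository]
--     return {lang: min(10 * langs.count(lang), 100) for lang in dict.fromkeys(langs)}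
-- ===== Notes on version B (the rewrite author's own statement) =====
-- stated objective: simpler
-- what changed: B replaces A's stateful capped dict accumulator (try/except driving first insertion) by a declarative two-stage form: extract the lowercased language list, dedupe it preserving first appearance, and map each distinct language to min(10*langs.count(lang), 100) -- no running accumulator, counting done by whole-list scans per distinct key.
import Mathlib
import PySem

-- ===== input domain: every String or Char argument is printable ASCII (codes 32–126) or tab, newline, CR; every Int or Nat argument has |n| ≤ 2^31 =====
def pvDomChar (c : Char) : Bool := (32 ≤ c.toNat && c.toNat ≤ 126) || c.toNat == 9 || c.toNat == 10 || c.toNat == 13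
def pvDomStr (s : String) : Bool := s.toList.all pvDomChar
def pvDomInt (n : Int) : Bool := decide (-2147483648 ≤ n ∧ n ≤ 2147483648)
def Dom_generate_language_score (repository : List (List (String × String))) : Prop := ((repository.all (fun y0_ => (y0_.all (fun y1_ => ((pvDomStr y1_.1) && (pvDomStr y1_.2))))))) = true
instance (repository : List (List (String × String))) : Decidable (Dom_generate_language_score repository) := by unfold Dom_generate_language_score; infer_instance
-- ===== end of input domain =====

-- ===== PORT A =====
-- B dedupes the lowercased language list (first appearance) and maps each distinct language
-- to min(10 * langs.count(lang), 100), replacing A's stateful capped dict accumulator. Objective: simpler.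
-- shared by both ports: the lowercased language key of one repo (repo['repo_language'].lower())
def pvKey (repo : List (String × String)) : String :=
  PySem.Str.lower (((PySem.Dict.mk repo).get? "repo_language").getD "")

-- A's loop body: try/except KeyError on programming_languages[lang]
def pvStepA (d : PySem.Dict String Int) (lang : String) : PySem.Dict String Int :=
  match d.get? lang with
  | some v => if v < 100 then d.insert lang (v + 10) else d
  | none => d.insert lang 10

def generate_language_score (repository : List (List (String × String))) : List (String × Int) :=
  (repository.foldl (fun d repo => pvStepA d (pvKey repo)) PySem.Dict.empty).items

-- ===== PORT B =====
def generate_language_score_alt (repository : List (List (String × String))) : List (String × Int) :=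
  let langs := repository.map pvKey
  (PySem.List.dedup langs).map (fun lang => (lang, min (10 * (langs.count lang : Int)) 100))

-- ===== PRECONDITION & SPEC =====
-- Pre_ excludes repos missing the 'repo_language' key, on which Python A raises KeyError.
def Pre_generate_language_score (repository : List (List (String × String))) : Prop :=
  ∀ repo ∈ repository, repo.any (fun p => p.1 == "repo_language") = true
instance (repository : List (List (String × String))) : Decidable (Pre_generate_language_score repository) := by unfold Pre_generate_language_score; infer_instance
def pvWitness_generate_language_score : (List (List (String × String))) :=
  [[("repo_language", "Python")], [("repo_language", "python")], [("repo_language", "C")]]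
def Spec_generate_language_score (repository : List (List (String × String))) (out : List (String × Int)) : Prop := out = generate_language_score_alt repository
instance (repository : List (List (String × String))) (out : List (String × Int)) : Decidable (Spec_generate_language_score repository out) := by unfold Spec_generate_language_score; infer_instance

-- ===== CLAIM (what is proved, stated in full; the proofs are below) =====
def Claim_equal_generate_language_score : Prop := ∀ (repository : List (List (String × String))), Dom_generate_language_score repository → Pre_generate_language_score repository → Spec_generate_language_score repository (generate_language_score repository)

-- ===== LEMMAS AND PROOFS =====

-- A's fold over the repos is the same fold over the list of language keys
theorem pvFold_map (repository : List (List (String × String))) (step : PySem.Dict String Int → String → PySem.Dict String Int) :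
    repository.foldl (fun d repo => step d (pvKey repo)) PySem.Dict.empty
      = (repository.map pvKey).foldl step PySem.Dict.empty := by
  rw [List.foldl_map]

-- characterisation of A's dict after folding over a key list
theorem pvA_items (xs : List String) :
    (xs.foldl pvStepA PySem.Dict.empty).items
      = (PySem.Set.ofList xs).map (fun k => (k, min ((xs.count k : Int) * 10) 100)) := by
  induction xs using List.reverseRecOn with
  | nil => rfl
  | append_singleton xs x ih =>
    rw [List.foldl_append, List.foldl_cons, List.foldl_nil]
    set d := xs.foldl pvStepA PySem.Dict.empty with hd
    have hkeys : d.keys = PySem.Set.ofList xs := by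
      show d.items.map Prod.fst = _
      rw [ih, List.map_map,
        show (Prod.fst ∘ fun k : String => (k, min ((xs.count k : Int) * 10) 100)) = fun k => k
          from rfl]
      exact List.map_id' _
    have hnd : d.keys.Nodup := by rw [hkeys]; exact PySem.Set.nodup_ofList xs
    have hcnt : ∀ k, ((xs ++ [x]).count k : Int)
        = (xs.count k : Int) + (if k = x then 1 else 0) := by
      intro k
      rw [List.count_append]
      by_cases h : k = x
      · subst h; rw [List.count_singleton]; push_cast; simp
      · have h0 : List.count k [x] = 0 := by
          simp [List.count_singleton']
          exact fun hh => h hh.symm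
        rw [h0]
        simp [h]
    by_cases hx : x ∈ PySem.Set.ofList xs
    · have hget : d.get? x = some (min ((xs.count x : Int) * 10) 100) := by
        exact PySem.Dict.get?_of_mem_items _ (by rw [ih]; exact List.mem_map_of_mem hx) hnd
      simp only [pvStepA, hget]
      rw [PySem.Set.ofList_append_singleton, PySem.Set.add_of_mem hx]
      by_cases hc : min ((xs.count x : Int) * 10) 100 < 100
      · rw [if_pos hc]
        have hcon : d.contains x = true := by
          rw [PySem.Dict.contains_iff_mem_keys, hkeys]; exact hx
        rw [PySem.Dict.items_insert, hcon, if_pos rfl, ih, List.map_map]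
        apply List.map_congr_left
        intro k hk
        simp only [Function.comp]
        by_cases hkx : k = x
        · subst hkx
          simp only [beq_self_eq_true, if_pos, hcnt, Prod.mk.injEq, true_and]
          omega
        · have hb : (k == x) = false := beq_false_of_ne hkx
          simp only [hb, Bool.false_eq_true, if_false, hcnt k, if_neg hkx, add_zero]
      · rw [if_neg hc, ih]
        apply List.map_congr_left
        intro k hk
        by_cases hkx : k = x
        · subst hkx
          rw [hcnt]
          simp only [Prod.mk.injEq, true_and]
          omega
        · rw [hcnt, if_neg hkx, add_zero]
    · have hget : d.get? x = none := by
        rw [PySem.Dict.get?_eq_none_iff_not_mem_keys, hkeys]; exact hx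
      have hcon : d.contains x = false := by
        rw [PySem.Dict.contains_eq_isSome_get?, hget]; rfl
      simp only [pvStepA, hget]
      rw [PySem.Dict.items_insert, hcon, if_neg (by simp), ih,
        PySem.Set.ofList_append_singleton, PySem.Set.add_of_not_mem hx, List.map_append]
      have hx0 : xs.count x = 0 := by
        rw [List.count_eq_zero]
        intro h; exact hx ((PySem.Set.mem_ofList xs x).mpr h)
      congr 1
      · apply List.map_congr_left
        intro k hk
        have hkx : k ≠ x := fun h => hx (h ▸ hk)
        rw [hcnt, if_neg hkx, add_zero]
      · simp [hx0]

-- ===== VERDICT (by name: the statement is the Claim_ definition above) =====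
theorem generate_language_score_spec : Claim_equal_generate_language_score := by
  intro repository _ _
  unfold Spec_generate_language_score generate_language_score generate_language_score_alt
  simp only [PySem.List.dedup_eq_ofList]
  rw [pvFold_map, pvA_items]
  apply List.map_congr_left
  intro k _
  rw [Int.mul_comm]
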